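-- pv_equiv track=rewrite | github.com/Musa-Husseini/CPTS-315 | HW1/HW1Code.py | pass2
-- ===== SOURCE A (Python) =====
-- import itertools as it
--
-- def pass2(data, p1data, support):
--     counter = {}
--     finalCounter = {}
--     combos = list(it.combinations(p1data.keys(), 2))
--
--     for key in combos:
--         counter[key] = 0
--
--
--     for row in data:
--         rcombo = list(it.combinations(row, 2))
--         for key in rcombo:
--             if (key in counter.keys()):
--                 counter[key] += 1
--             elif (key[::-1] in counter.keys()):
--                 counter[key[::-1]] += 1
--
--
--
--     for key, value in counter.items():
--         if value >= support:
--             finalCounter[key] = value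
--
--
--     return finalCounter
-- ===== SOURCE B (Python) =====
-- import itertools as it
--
-- def pass2(data, p1data, support):
--     # vertical counting: per-row multiplicity dicts, then a dot product per candidate pair
--     rowcounts = []
--     for row in data:
--         c = {}
--         for x in row:
--             if x in p1data:
--                 c[x] = c.get(x, 0) + 1
--         rowcounts.append(c)
--     result = {}
--     for a, b in it.combinations(p1data.keys(), 2):
--         total = 0
--         for c in rowcounts:
--             total += c.get(a, 0) * c.get(b, 0)
--         if total >= support:
--             result[(a, b)] = total
--     return result
-- ===== Notes on version B (the rewrite author's own statement) =====
-- stated objective: alternative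
-- what changed: Replaces A's horizontal scheme (enumerate every pair inside each row and increment a global pair-counter dict via two-way membership lookup) by a vertical one: one pass builds a per-row multiplicity dict of the frequent items, then each candidate pair's total is computed as the dot product of the two items' per-row multiplicities.
import Mathlib
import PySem

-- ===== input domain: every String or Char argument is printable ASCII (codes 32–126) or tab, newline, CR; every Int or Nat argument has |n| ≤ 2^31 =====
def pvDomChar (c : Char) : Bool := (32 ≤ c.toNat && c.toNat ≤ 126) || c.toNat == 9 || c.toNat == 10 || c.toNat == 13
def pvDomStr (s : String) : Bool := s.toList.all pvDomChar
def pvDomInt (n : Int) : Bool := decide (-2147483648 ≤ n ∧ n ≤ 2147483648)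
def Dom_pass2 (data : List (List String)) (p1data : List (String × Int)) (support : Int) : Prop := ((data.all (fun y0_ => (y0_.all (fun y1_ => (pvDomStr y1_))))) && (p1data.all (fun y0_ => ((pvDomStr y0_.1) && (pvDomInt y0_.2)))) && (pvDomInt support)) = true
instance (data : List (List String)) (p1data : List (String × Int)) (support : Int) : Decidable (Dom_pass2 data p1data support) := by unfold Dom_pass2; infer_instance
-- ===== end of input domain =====

-- B replaces A's per-row pair enumeration with two-way dict lookups by per-row multiplicity
-- dicts and a per-candidate-pair dot product over them (objective: alternative decomposition).


-- ===== PORT A =====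
-- list(itertools.combinations(l, 2)) as ordered pairs (CPython's order)
def combos2 {α : Type} : List α → List (α × α)
  | [] => []
  | x :: xs => xs.map (fun y => (x, y)) ++ combos2 xs

def pass2 (data : List (List String)) (p1data : List (String × Int)) (support : Int) : List (String × String × Int) :=
  let combos := combos2 (PySem.Dict.ofList p1data).keys
  let counter0 : PySem.Dict (String × String) Int :=
    combos.foldl (fun d k => d.insert k 0) PySem.Dict.empty
  let counter := data.foldl (fun d row =>
    (combos2 row).foldl (fun d key =>
      if d.contains key then d.modify key 0 (· + 1)
      else if d.contains (key.2, key.1) then d.modify (key.2, key.1) 0 (· + 1)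
      else d) d) counter0
  counter.items.foldl (fun acc kv =>
    if kv.2 ≥ support then acc ++ [(kv.1.1, kv.1.2, kv.2)] else acc) []

-- ===== PORT B =====
def pass2_alt (data : List (List String)) (p1data : List (String × Int)) (support : Int) : List (String × String × Int) :=
  let pd := PySem.Dict.ofList p1data
  let rowcounts := data.map (fun row =>
    row.foldl (fun c x => if pd.contains x then c.insert x (c.getD x 0 + 1) else c)
      (PySem.Dict.empty : PySem.Dict String Int))
  (combos2 pd.keys).foldl (fun acc ab =>
    let total := rowcounts.foldl (fun s c => s + c.getD ab.1 0 * c.getD ab.2 0) 0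
    if total ≥ support then acc ++ [(ab.1, ab.2, total)] else acc) []

-- ===== PRECONDITION & SPEC =====
def Spec_pass2 (data : List (List String)) (p1data : List (String × Int)) (support : Int) (out : List (String × String × Int)) : Prop := out = pass2_alt data p1data support
instance (data : List (List String)) (p1data : List (String × Int)) (support : Int) (out : List (String × String × Int)) : Decidable (Spec_pass2 data p1data support out) := by unfold Spec_pass2; infer_instance

-- ===== CLAIM (what is proved, stated in full; the proofs are below) =====
def Claim_equal_pass2 : Prop := ∀ (data : List (List String)) (p1data : List (String × Int)) (support : Int), Dom_pass2 data p1data support → Spec_pass2 data p1data support (pass2 data p1data support)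

-- ===== LEMMAS AND PROOFS =====

theorem mem_combos2 {α : Type} (x : α) (xs : List α) (p : α × α) :
    p ∈ combos2 (x :: xs) ↔ (p.1 = x ∧ p.2 ∈ xs) ∨ p ∈ combos2 xs := by
  simp [combos2, List.mem_append, List.mem_map]
  constructor
  · rintro (⟨y, hy, rfl⟩ | h)
    · exact Or.inl ⟨rfl, hy⟩
    · exact Or.inr h
  · rintro (⟨h1, h2⟩ | h)
    · exact Or.inl ⟨p.2, h2, by rw [← h1]⟩
    · exact Or.inr h

theorem combos2_mem {α : Type} (l : List α) (p : α × α) (h : p ∈ combos2 l) :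
    p.1 ∈ l ∧ p.2 ∈ l := by
  induction l with
  | nil => simp [combos2] at h
  | cons x xs ih =>
    rcases (mem_combos2 x xs p).1 h with ⟨h1, h2⟩ | h
    · exact ⟨by simp [h1], by simp [h2]⟩
    · rcases ih h with ⟨a, b⟩; exact ⟨List.mem_cons_of_mem _ a, List.mem_cons_of_mem _ b⟩

theorem combos2_swap {α : Type} (l : List α) (hl : l.Nodup) (a b : α)
    (h : (a, b) ∈ combos2 l) : a ≠ b ∧ (b, a) ∉ combos2 l := by
  induction l with
  | nil => simp [combos2] at h
  | cons x xs ih =>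
    rcases List.nodup_cons.1 hl with ⟨hx, hxs⟩
    rcases (mem_combos2 x xs (a, b)).1 h with ⟨h1, h2⟩ | h
    · simp only at h1 h2
      subst h1
      refine ⟨fun hab => hx (hab.symm ▸ h2), fun hba => ?_⟩
      rcases (mem_combos2 a xs (b, a)).1 hba with ⟨_, g2⟩ | g
      · exact hx g2
      · exact hx (combos2_mem xs _ g).2
    · rcases ih hxs h with ⟨hab, hba⟩
      refine ⟨hab, fun hc => ?_⟩
      rcases (mem_combos2 x xs (b, a)).1 hc with ⟨g1, _⟩ | g
      · simp only at g1
        exact hx (g1 ▸ (combos2_mem xs _ h).2)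
      · exact hba g

theorem combos2_nodup {α : Type} (l : List α) (hl : l.Nodup) : (combos2 l).Nodup := by
  induction l with
  | nil => simp [combos2]
  | cons x xs ih =>
    rcases List.nodup_cons.1 hl with ⟨hx, hxs⟩
    refine List.Nodup.append ?_ (ih hxs) ?_
    · exact (List.nodup_map_iff (fun u v h => by simpa using congrArg Prod.snd h)).2 hxs
    · intro p hp hq
      rcases List.mem_map.1 hp with ⟨y, _, rfl⟩
      exact hx (combos2_mem xs _ hq).1

-- count of (a,b) in the pairs xs.map (fun y => (x,y))
theorem count_map_pair {α : Type} [DecidableEq α] (x : α) (xs : List α) (a b : α) :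
    (xs.map (fun y => (x, y))).count (a, b) = if x = a then xs.count b else 0 := by
  induction xs with
  | nil => simp
  | cons y ys ih =>
    simp only [List.map_cons, List.count_cons, ih, Prod.mk.injEq]
    by_cases hx : x = a <;> by_cases hy : y = b <;> simp [hx, hy]

-- combinatorial core: pair occurrences in a row = product of item multiplicities
theorem combos2_count_mul {α : Type} [DecidableEq α] (row : List α) (a b : α) (hab : a ≠ b) :
    (combos2 row).count (a, b) + (combos2 row).count (b, a) = row.count a * row.count b := by
  induction row with
  | nil => simp [combos2]
  | cons x xs ih =>
    have hba : b ≠ a := Ne.symm hab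
    simp only [combos2, List.count_append, count_map_pair, List.count_cons]
    by_cases hxa : x = a <;> by_cases hxb : x = b
    · exact absurd (hxa.symm.trans hxb) hab
    · subst hxa
      simp [hxb, hba]
      nlinarith [ih]
    · subst hxb
      simp [hxa, hab]
      nlinarith [ih]
    · have h1 : ¬ (a = x) := fun h => hxa h.symm
      have h2 : ¬ (b = x) := fun h => hxb h.symm
      simp [hxa, hxb, h1, h2]
      nlinarith [ih]

-- A's per-key step
def stepA (d : PySem.Dict (String × String) Int) (key : String × String) :
    PySem.Dict (String × String) Int :=
  if d.contains key then d.modify key 0 (· + 1)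
  else if d.contains (key.2, key.1) then d.modify (key.2, key.1) 0 (· + 1)
  else d

theorem keys_stepA (d : PySem.Dict (String × String) Int) (key : String × String) :
    (stepA d key).keys = d.keys := by
  unfold stepA
  by_cases h1 : d.contains key
  · rw [if_pos h1, PySem.Dict.keys_modify, PySem.Dict.keys_insert_of_contains]
    simpa using h1
  · rw [if_neg h1]
    by_cases h2 : d.contains (key.2, key.1)
    · rw [if_pos h2, PySem.Dict.keys_modify, PySem.Dict.keys_insert_of_contains]
      simpa using h2
    · rw [if_neg h2]

theorem getD_stepA (combos : List (String × String))
    (d : PySem.Dict (String × String) Int) (hk : d.keys = combos)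
    (a b : String) (hab : (a, b) ∈ combos) (hba : (b, a) ∉ combos) (hne : a ≠ b)
    (p : String × String) :
    (stepA d p).getD (a, b) 0 =
      d.getD (a, b) 0 + (if p = (a, b) then 1 else 0) + (if p = (b, a) then 1 else 0) := by
  have hcont : ∀ q : String × String, d.contains q = true ↔ q ∈ combos := by
    intro q; rw [PySem.Dict.contains_iff_mem_keys, hk]
  unfold stepA
  by_cases h1 : d.contains p
  · rw [if_pos h1, PySem.Dict.getD_modify]
    have hpmem : p ∈ combos := (hcont p).1 h1
    by_cases hp : p = (a, b)
    · have hpba : ¬ (p = (b, a)) := by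
        intro h
        rw [hp] at h
        exact hne (congrArg Prod.fst h)
      have hq : ((a, b) : String × String) = p := hp.symm
      rw [if_pos hq, if_pos hp, if_neg (by
        intro h; exact hba (h ▸ hpmem)), hp]
      ring
    · have hpba : ¬ (p = (b, a)) := fun h => hba (h ▸ hpmem)
      have hq : ¬ (((a, b) : String × String) = p) := fun h => hp h.symm
      rw [if_neg hq, if_neg hp, if_neg hpba]
      ring
  · rw [if_neg h1]
    have hpab : ¬ (p = (a, b)) := fun h => h1 ((hcont p).2 (h ▸ hab))
    by_cases h2 : d.contains (p.2, p.1)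
    · rw [if_pos h2, PySem.Dict.getD_modify]
      by_cases hp : p = (b, a)
      · have hq : ((a, b) : String × String) = (p.2, p.1) := by rw [hp]
        rw [if_pos hq, if_neg hpab, if_pos hp, hp]
        ring
      · have hq : ¬ (((a, b) : String × String) = (p.2, p.1)) := by
          intro h
          apply hp
          have ha' : a = p.2 := congrArg Prod.fst h
          have hb' : b = p.1 := congrArg Prod.snd h
          cases p
          simp only at ha' hb'
          simp [ha', hb']
        rw [if_neg hq, if_neg hpab, if_neg hp]
        ring
    · rw [if_neg h2]
      have hpba : ¬ (p = (b, a)) := by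
        intro h
        apply h2
        apply (hcont _).2
        have : ((p.2, p.1) : String × String) = (a, b) := by rw [h]
        exact this ▸ hab
      rw [if_neg hpab, if_neg hpba]
      ring

theorem inner_fold (combos : List (String × String)) (hcn : combos.Nodup)
    (a b : String) (hab : (a, b) ∈ combos) (hba : (b, a) ∉ combos) (hne : a ≠ b)
    (L : List (String × String)) :
    ∀ d : PySem.Dict (String × String) Int, d.keys = combos →
      (L.foldl stepA d).keys = combos ∧
      (L.foldl stepA d).getD (a, b) 0 =
        d.getD (a, b) 0 + L.count (a, b) + L.count (b, a) := by
  induction L with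
  | nil => intro d hk; simp [hk]
  | cons p L ih =>
    intro d hk
    have hk' : (stepA d p).keys = combos := by rw [keys_stepA, hk]
    rcases ih (stepA d p) hk' with ⟨h1, h2⟩
    refine ⟨h1, ?_⟩
    rw [List.foldl_cons, h2, getD_stepA combos d hk a b hab hba hne p]
    simp only [List.count_cons]
    by_cases hp : p = (a, b) <;> by_cases hq : p = (b, a) <;>
      simp only [hp, hq, if_pos, if_neg, if_true, if_false, beq_iff_eq, reduceIte] <;>
      push_cast <;> ring

theorem outer_fold (combos : List (String × String)) (hcn : combos.Nodup)
    (a b : String) (hab : (a, b) ∈ combos) (hba : (b, a) ∉ combos) (hne : a ≠ b)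
    (rows : List (List String)) :
    ∀ d : PySem.Dict (String × String) Int, d.keys = combos →
      (rows.foldl (fun d row => (combos2 row).foldl stepA d) d).getD (a, b) 0 =
        d.getD (a, b) 0 + (rows.map (fun row => ((row.count a : Int) * row.count b))).sum := by
  induction rows with
  | nil => intro d hk; simp
  | cons row rows ih =>
    intro d hk
    rcases inner_fold combos hcn a b hab hba hne (combos2 row) d hk with ⟨h1, h2⟩
    rw [List.foldl_cons, ih _ h1, h2]
    have hc := combos2_count_mul row a b hne
    have hcInt : (((combos2 row).count (a, b) : Int)) + ((combos2 row).count (b, a) : Int)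
        = (row.count a : Int) * (row.count b : Int) := by exact_mod_cast hc
    simp only [List.map_cons, List.sum_cons]
    push_cast
    linarith [hcInt]

-- B's per-row dict counts occurrences of each contained item
theorem rowdict_getD (pd : PySem.Dict String Int) (a : String) (ha : pd.contains a = true)
    (row : List String) :
    ∀ c : PySem.Dict String Int,
      (row.foldl (fun c x => if pd.contains x then c.insert x (c.getD x 0 + 1) else c) c).getD a 0
        = c.getD a 0 + row.count a := by
  induction row with
  | nil => intro c; simp
  | cons x row ih =>
    intro c
    rw [List.foldl_cons]
    by_cases hx : pd.contains x
    · rw [if_pos hx, ih, PySem.Dict.getD_insert]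
      by_cases hax : a = x
      · subst hax
        rw [if_pos rfl]
        simp only [List.count_cons, beq_iff_eq, if_pos rfl]
        push_cast
        ring
      · have hxa : ¬ (x = a) := fun h => hax h.symm
        rw [if_neg hax]
        simp only [List.count_cons, beq_iff_eq, if_neg hxa]
        push_cast
        ring
    · rw [if_neg hx, ih]
      have hax : x ≠ a := fun h => hx (h ▸ ha)
      simp [List.count_cons, hax]

-- initial counter: keys are exactly combos, all values zero
theorem counter0_keys (combos : List (String × String)) (hcn : combos.Nodup) :
    (combos.foldl (fun d k => d.insert k (0 : Int)) PySem.Dict.empty).keys = combos := by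
  have h := PySem.Dict.items_foldl_insert_fresh combos (fun k => k) (fun _ => (0 : Int))
    PySem.Dict.empty (by intro a _; simp) (by simpa using hcn)
  show (combos.foldl (fun d k => d.insert k (0 : Int)) PySem.Dict.empty).items.map (·.1) = combos
  simp only at h
  rw [h]
  simp only [PySem.Dict.empty, List.nil_append, List.map_map]
  have hcomp : (fun (x : (String × String) × Int) => x.1) ∘ (fun a : String × String => (a, (0 : Int))) = id := rfl
  rw [hcomp, List.map_id]

theorem counter0_zero (combos : List (String × String)) (q : String × String) :
    (combos.foldl (fun d k => d.insert k (0 : Int)) PySem.Dict.empty).getD q 0 = 0 := by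
  have h : ∀ d : PySem.Dict (String × String) Int, d.getD q 0 = 0 →
      (combos.foldl (fun d k => d.insert k (0 : Int)) d).getD q 0 = 0 := by
    induction combos with
    | nil => intro d h; simpa using h
    | cons k ks ih =>
      intro d h
      rw [List.foldl_cons]
      apply ih
      rw [PySem.Dict.getD_insert]
      by_cases hq : q = k <;> simp [hq, h]
  exact h _ (PySem.Dict.getD_empty q 0)

theorem keys_outer (rows : List (List String)) :
    ∀ d : PySem.Dict (String × String) Int,
      (rows.foldl (fun d row => (combos2 row).foldl stepA d) d).keys = d.keys := by
  induction rows with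
  | nil => intro d; rfl
  | cons row rows ih =>
    intro d
    rw [List.foldl_cons, ih]
    generalize combos2 row = L
    induction L generalizing d with
    | nil => rfl
    | cons p L ihL => rw [List.foldl_cons, ihL, keys_stepA]

-- ===== the main equivalence =====
theorem pass2_eq (data : List (List String)) (p1data : List (String × Int)) (support : Int) :
    pass2 data p1data support = pass2_alt data p1data support := by
  simp only [pass2, pass2_alt]
  have hS : (fun (d : PySem.Dict (String × String) Int) (key : String × String) =>
      if d.contains key then d.modify key 0 (· + 1)
      else if d.contains (key.2, key.1) then d.modify (key.2, key.1) 0 (· + 1)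
      else d) = stepA := rfl
  rw [hS]
  have hkn : (PySem.Dict.ofList p1data).keys.Nodup := PySem.Dict.nodup_keys_ofList p1data
  generalize hpd : PySem.Dict.ofList p1data = pd at hkn ⊢
  have hcn : (combos2 pd.keys).Nodup := combos2_nodup _ hkn
  have hk0 : ((combos2 pd.keys).foldl (fun d k => d.insert k (0 : Int)) PySem.Dict.empty).keys
      = combos2 pd.keys := counter0_keys _ hcn
  have hkeys : (data.foldl (fun d row => (combos2 row).foldl stepA d)
      ((combos2 pd.keys).foldl (fun d k => d.insert k (0 : Int)) PySem.Dict.empty)).keys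
      = combos2 pd.keys := by rw [keys_outer, hk0]
  rw [PySem.Dict.items_eq_map_keys _ (hkeys.symm ▸ hcn) 0, hkeys, List.foldl_map]
  apply PySem.List.foldl_congr_mem
  intro acc k hkmem
  rcases k with ⟨a, b⟩
  rcases combos2_swap pd.keys hkn a b hkmem with ⟨hne, hba⟩
  have hval : (data.foldl (fun d row => (combos2 row).foldl stepA d)
      ((combos2 pd.keys).foldl (fun d k => d.insert k (0 : Int)) PySem.Dict.empty)).getD (a, b) 0
      = (data.map (fun row => ((row.count a : Int) * row.count b))).sum := by
    rw [outer_fold (combos2 pd.keys) hcn a b hkmem hba hne data _ hk0, counter0_zero, zero_add]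
  have hamem : a ∈ pd.keys := (combos2_mem pd.keys _ hkmem).1
  have hbmem : b ∈ pd.keys := (combos2_mem pd.keys _ hkmem).2
  have ha : pd.contains a = true := (PySem.Dict.contains_iff_mem_keys pd a).2 hamem
  have hb : pd.contains b = true := (PySem.Dict.contains_iff_mem_keys pd b).2 hbmem
  have h2 : (data.map (fun row =>
        row.foldl (fun c x => if pd.contains x then c.insert x (c.getD x 0 + 1) else c)
          (PySem.Dict.empty : PySem.Dict String Int))).foldl
        (fun s c => s + c.getD a 0 * c.getD b 0) 0
      = (data.map (fun row => ((row.count a : Int) * row.count b))).sum := by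
    rw [List.foldl_map, PySem.List.foldl_add]
    simp only [zero_add]
    congr 1
    apply List.map_congr_left
    intro row _
    rw [rowdict_getD pd a ha row PySem.Dict.empty, rowdict_getD pd b hb row PySem.Dict.empty]
    simp
  simp only [hval, h2]

-- ===== VERDICT (by name: the statement is the Claim_ definition above) =====
theorem pass2_spec : Claim_equal_pass2 := by
  intro data p1data support _
  unfold Spec_pass2
  exact pass2_eq data p1data support
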